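-- pv_equiv track=rewrite | github.com/sgolanka/A-December-of-Algorithms-2019 | December-03/Decimation.py | decimate
-- ===== SOURCE A (Python) =====
-- def decimate(d):
--     # ----> these two lines are used for both versions
--     s_list = d[:] # creates a copy of the list
--     s_list.sort()
--
--     # ----> non-recursive way (it works)
--     while s_list != d:
--         half = int(len(d)/2)
--         d = d[half:]
--         s_list = d[:]
--         s_list.sort()
--     return d
-- ===== SOURCE B (Python) =====
-- def decimate(d):
--     # Locate the start of the longest sorted suffix with one backward-free scan,
--     # then replay the halving index arithmetic without ever sorting.
--     n = len(d)
--     f = 0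
--     for j in range(1, n):
--         if d[j - 1] > d[j]:
--             f = j
--     i = 0
--     while i < f:
--         i += (n - i) // 2
--     return d[i:]
-- ===== Notes on version B (the rewrite author's own statement) =====
-- stated objective: alternative
-- what changed: Instead of repeatedly sorting a copy of the shrinking list until it equals itself, B finds the start of the longest sorted suffix with one adjacent-pair scan and then replays the halving index arithmetic on plain integers, returning one suffix slice; no sorting is performed.
import Mathlib
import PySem

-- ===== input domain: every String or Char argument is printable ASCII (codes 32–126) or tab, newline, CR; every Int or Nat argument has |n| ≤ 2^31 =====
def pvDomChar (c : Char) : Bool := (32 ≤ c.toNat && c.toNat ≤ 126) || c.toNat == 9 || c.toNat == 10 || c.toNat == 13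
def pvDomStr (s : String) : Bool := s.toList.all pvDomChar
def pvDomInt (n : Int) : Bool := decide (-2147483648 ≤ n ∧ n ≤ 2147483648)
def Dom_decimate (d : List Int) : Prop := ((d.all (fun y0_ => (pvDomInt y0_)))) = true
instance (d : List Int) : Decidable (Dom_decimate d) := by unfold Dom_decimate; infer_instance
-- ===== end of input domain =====

-- B replaces A's repeated sort-and-compare rounds by one adjacency scan locating where the
-- sorted suffix starts, plus integer halving arithmetic picking the returned suffix slice.

-- A-side helper: sorted(d) = d on lists of length ≤ 1 (needed for A's termination)
theorem pvSortedShort (d : List Int) (h : d.length ≤ 1) :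
    PySem.List.sorted d (fun x => x) false = d := by
  match d, h with
  | [], _ => rfl
  | [a], _ => exact PySem.List.sorted_eq_self_of_pairwise _ _ (List.pairwise_singleton _ _)

-- ===== PORT A =====
-- while sorted(d) != d: d = d[int(len(d)/2):]   (int(len(d)/2) = len(d)//2: the length is nonnegative)
def decimate (d : List Int) : List Int :=
  if PySem.List.sorted d (fun x => x) false ≠ d then
    decimate (PySem.List.slice d (some ((d.length / 2 : Nat) : Int)) none)
  else d
termination_by d.length
decreasing_by
  rename_i h
  rw [PySem.List.slice_from_natCast, List.length_drop]
  have : ¬ d.length ≤ 1 := fun hle => h (pvSortedShort d hle)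
  omega

-- ===== PORT B =====
-- f = 0; for j in range(1, n): if d[j-1] > d[j]: f = j
def lastDescent (d : List Int) : Int :=
  (PySem.List.pyRange 1 (d.length : Int) 1).foldl
    (fun f j => if PySem.List.pyGetD d (j - 1) 0 > PySem.List.pyGetD d j 0 then j else f) 0

-- i = 0; while i < f: i += (n - i) // 2   (fuel n bounds the iteration count; never exhausted on B's calls)
def halveIdx (fuel : Nat) (n f i : Int) : Int :=
  match fuel with
  | 0 => i
  | fu + 1 => if i < f then halveIdx fu n f (i + PySem.Int.floordiv (n - i) 2) else i

def decimate_alt (d : List Int) : List Int :=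
  PySem.List.slice d (some (halveIdx d.length (d.length : Int) (lastDescent d) 0)) none

-- ===== PRECONDITION & SPEC =====
def Spec_decimate (d : List Int) (out : List Int) : Prop := out = decimate_alt d
instance (d : List Int) (out : List Int) : Decidable (Spec_decimate d out) := by unfold Spec_decimate; infer_instance

-- ===== CLAIM (what is proved, stated in full; the proofs are below) =====
def Claim_equal_decimate : Prop := ∀ (d : List Int), Dom_decimate d → Spec_decimate d (decimate d)

-- ===== LEMMAS AND PROOFS =====

-- sorted(d) == d  ↔  d is pairwise nondecreasing
theorem pvSortedIff (d : List Int) :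
    PySem.List.sorted d (fun x => x) false = d ↔ d.Pairwise (· ≤ ·) := by
  constructor
  · intro h
    have hp := PySem.List.sorted_pairwise d (fun x => x)
    rw [h] at hp
    exact hp
  · intro h; exact PySem.List.sorted_eq_self_of_pairwise _ _ h

-- lists of length ≤ 1 are pairwise nondecreasing
theorem pvShortPairwise (d : List Int) (h : d.length ≤ 1) : d.Pairwise (· ≤ ·) := by
  match d, h with
  | [], _ => exact List.Pairwise.nil
  | [a], _ => exact List.pairwise_singleton _ _

-- the fold underlying lastDescent, characterised: its value is ≤ k iff no descent strictly after k
theorem pvFoldChar (d : List Int) (m : Nat) (k : Int) (hk : 0 ≤ k) :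
    ((PySem.List.pyRange 1 (m : Int) 1).foldl
      (fun f j => if PySem.List.pyGetD d (j - 1) 0 > PySem.List.pyGetD d j 0 then j else f) 0) ≤ k ↔
    (∀ j : Int, 1 ≤ j → j < (m : Int) → k < j →
      PySem.List.pyGetD d (j - 1) 0 ≤ PySem.List.pyGetD d j 0) := by
  induction m with
  | zero =>
    rw [PySem.List.pyRange_one_eq_nil (by norm_num)]
    simp only [List.foldl_nil]
    constructor
    · intro _ j _ hj _; exfalso; omega
    · intro _; exact hk
  | succ m ih =>
    by_cases hm : m = 0
    · subst hm
      rw [PySem.List.pyRange_one_eq_nil (by norm_num)]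
      simp only [List.foldl_nil]
      constructor
      · intro _ j h1 hj _; exfalso; omega
      · intro _; exact hk
    · have h1m : (1 : Int) ≤ (m : Int) := by omega
      have : ((m + 1 : Nat) : Int) = (m : Int) + 1 := by push_cast; ring
      rw [this, PySem.List.pyRange_one_succ_right h1m, List.foldl_append]
      simp only [List.foldl_cons, List.foldl_nil]
      by_cases hp : PySem.List.pyGetD d ((m : Int) - 1) 0 > PySem.List.pyGetD d (m : Int) 0
      · rw [if_pos hp]
        constructor
        · intro hmk j _ hj hkj; exfalso; omega
        · intro hall
          by_contra hc
          exact absurd (hall (m : Int) h1m (by omega) (by omega)) (by omega)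
      · rw [if_neg hp]
        rw [ih]
        constructor
        · intro hall j hj1 hj2 hkj
          rcases lt_or_ge j (m : Int) with hlt | hge
          · exact hall j hj1 hlt hkj
          · have : j = (m : Int) := by omega
            subst this; omega
        · intro hall j hj1 hj2 hkj
          exact hall j hj1 (by omega) hkj

-- bounds of the fold underlying lastDescent
theorem pvFoldBounds (d : List Int) (m : Nat) :
    0 ≤ ((PySem.List.pyRange 1 (m : Int) 1).foldl
      (fun f j => if PySem.List.pyGetD d (j - 1) 0 > PySem.List.pyGetD d j 0 then j else f) 0) ∧
    ((PySem.List.pyRange 1 (m : Int) 1).foldl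
      (fun f j => if PySem.List.pyGetD d (j - 1) 0 > PySem.List.pyGetD d j 0 then j else f) 0) < max 1 (m : Int) := by
  induction m with
  | zero =>
    rw [PySem.List.pyRange_one_eq_nil (by norm_num)]
    simp
  | succ m ih =>
    by_cases hm : m = 0
    · subst hm
      rw [PySem.List.pyRange_one_eq_nil (by norm_num)]
      simp
    · have h1m : (1 : Int) ≤ (m : Int) := by omega
      have : ((m + 1 : Nat) : Int) = (m : Int) + 1 := by push_cast; ring
      rw [this, PySem.List.pyRange_one_succ_right h1m, List.foldl_append]
      simp only [List.foldl_cons, List.foldl_nil]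
      by_cases hp : PySem.List.pyGetD d ((m : Int) - 1) 0 > PySem.List.pyGetD d (m : Int) 0
      · rw [if_pos hp]; constructor <;> omega
      · rw [if_neg hp]
        obtain ⟨hl, hr⟩ := ih
        constructor
        · exact hl
        · have : max 1 (m : Int) ≤ max 1 ((m : Int) + 1) := by omega
          omega

theorem pvLastDescentBounds (d : List Int) :
    0 ≤ lastDescent d ∧ lastDescent d < max 1 (d.length : Int) :=
  pvFoldBounds d d.length

-- adjacency implies full monotonicity on getElem indices
theorem pvAdjMono (l : List Int) (hadj : ∀ i : Nat, (hi : i + 1 < l.length) → l[i] ≤ l[i + 1]) :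
    ∀ (q p : Nat) (hq : q < l.length) (hpq : p ≤ q), l[p]'(by omega) ≤ l[q] := by
  intro q
  induction q with
  | zero =>
    intro p hq hpq
    have hp0 : p = 0 := by omega
    subst hp0
    exact le_refl _
  | succ q ihq =>
    intro p hq hpq
    rcases Nat.lt_or_ge p (q + 1) with hlt | hge
    · exact le_trans (ihq p (by omega) (by omega)) (hadj q hq)
    · have hp : p = q + 1 := by omega
      subst hp
      exact le_refl _

-- pairwise of a dropped suffix ↔ no descent strictly after the cut
theorem pvDropPairwiseIff (d : List Int) (t : Nat) :
    (d.drop t).Pairwise (· ≤ ·) ↔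
    (∀ j : Int, 1 ≤ j → j < (d.length : Int) → (t : Int) < j →
      PySem.List.pyGetD d (j - 1) 0 ≤ PySem.List.pyGetD d j 0) := by
  have hPy : ∀ k : Int, 0 ≤ k → k < (d.length : Int) →
      PySem.List.pyGetD d k 0 = d.getD k.toNat 0 := by
    intro k h0 h1
    rw [PySem.List.pyGetD_eq_getElem d 0 h0 h1, List.getD_eq_getElem d 0 (by omega)]
  have key : (d.drop t).Pairwise (· ≤ ·) ↔
      (∀ a : Nat, t < a → a < d.length → d.getD (a - 1) 0 ≤ d.getD a 0) := by
    constructor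
    · intro hpw a ha1 ha2
      have h := List.pairwise_iff_getElem.1 hpw (a - 1 - t) (a - t)
        (by rw [List.length_drop]; omega) (by rw [List.length_drop]; omega) (by omega)
      rw [List.getElem_drop, List.getElem_drop] at h
      rw [← List.getD_eq_getElem d 0 (n := t + (a - 1 - t)) (by omega),
          ← List.getD_eq_getElem d 0 (n := t + (a - t)) (by omega)] at h
      have e1 : t + (a - 1 - t) = a - 1 := by omega
      have e2 : t + (a - t) = a := by omega
      rw [e1, e2] at h
      exact h
    · intro hadj
      rw [List.pairwise_iff_getElem]
      intro p q hp hq hpq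
      refine pvAdjMono (d.drop t) ?_ q p hq (by omega)
      intro i hi
      have hlen : t + i + 1 < d.length := by rw [List.length_drop] at hi; omega
      rw [List.getElem_drop, List.getElem_drop]
      rw [← List.getD_eq_getElem d 0 (n := t + i) (by omega),
          ← List.getD_eq_getElem d 0 (n := t + (i + 1)) (by omega)]
      have h := hadj (t + i + 1) (by omega) hlen
      have e1 : t + i + 1 - 1 = t + i := by omega
      have e2 : t + (i + 1) = t + i + 1 := by omega
      rw [e1] at h
      rw [e2]
      exact h
  rw [key]
  constructor
  · intro hall j hj1 hj2 htj
    rw [hPy (j - 1) (by omega) (by omega), hPy j (by omega) hj2]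
    have h := hall j.toNat (by omega) (by omega)
    have e : (j - 1).toNat = j.toNat - 1 := by omega
    rw [e]
    exact h
  · intro hall a ha1 ha2
    have h := hall (a : Int) (by omega) (by exact_mod_cast ha2) (by omega)
    rw [hPy ((a : Int) - 1) (by omega) (by omega),
        hPy (a : Int) (by omega) (by exact_mod_cast ha2)] at h
    have e1 : ((a : Int) - 1).toNat = a - 1 := by omega
    have e2 : ((a : Int)).toNat = a := by omega
    rw [e1, e2] at h
    exact h

theorem pvChar (d : List Int) (t : Nat) :
    lastDescent d ≤ (t : Int) ↔ (d.drop t).Pairwise (· ≤ ·) := by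
  unfold lastDescent
  rw [pvFoldChar d d.length (t : Int) (by positivity)]
  exact (pvDropPairwiseIff d t).symm

-- the halving loop stops immediately when i ≥ f
theorem pvHalveStop (fu : Nat) (n f i : Int) (h : ¬ i < f) : halveIdx fu n f i = i := by
  cases fu with
  | zero => rfl
  | succ fu => simp [halveIdx, h]

-- halveIdx ignores fuel beyond sufficiency
theorem pvHalveFuel (c : Nat) : ∀ (fu fu' : Nat) (n f i : Int), f ≤ n - 1 →
    (f - i).toNat ≤ c → (f - i).toNat ≤ fu → (f - i).toNat ≤ fu' →
    halveIdx fu n f i = halveIdx fu' n f i := by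
  induction c with
  | zero =>
    intro fu fu' n f i hf hc _ _
    have : ¬ i < f := by omega
    rw [pvHalveStop fu n f i this, pvHalveStop fu' n f i this]
  | succ c ih =>
    intro fu fu' n f i hf hc h1 h2
    by_cases hif : i < f
    · have hpos : (1 : Nat) ≤ (f - i).toNat := by omega
      obtain ⟨a, rfl⟩ : ∃ a, fu = a + 1 := ⟨fu - 1, by omega⟩
      obtain ⟨b, rfl⟩ : ∃ b, fu' = b + 1 := ⟨fu' - 1, by omega⟩
      simp only [halveIdx, if_pos hif]
      have hstep : 1 ≤ PySem.Int.floordiv (n - i) 2 := by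
        rw [PySem.Int.floordiv_eq_ediv_of_pos (by norm_num)]
        omega
      exact ih a b n f (i + PySem.Int.floordiv (n - i) 2) hf (by omega) (by omega) (by omega)
    · rw [pvHalveStop _ n f i hif, pvHalveStop _ n f i hif]

-- halveIdx keeps the index within [i, n]
theorem pvHalveBounds (fu : Nat) : ∀ (n f i : Int), 0 ≤ i → i ≤ n → f ≤ n - 1 →
    i ≤ halveIdx fu n f i ∧ halveIdx fu n f i ≤ n := by
  induction fu with
  | zero => intro n f i hi hin _; exact ⟨le_refl _, hin⟩
  | succ fu ih =>
    intro n f i hi hin hf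
    by_cases hif : i < f
    · simp only [halveIdx, if_pos hif]
      have hstep : 1 ≤ PySem.Int.floordiv (n - i) 2 := by
        rw [PySem.Int.floordiv_eq_ediv_of_pos (by norm_num)]; omega
      have hle : i + PySem.Int.floordiv (n - i) 2 ≤ n := by
        rw [PySem.Int.floordiv_eq_ediv_of_pos (by norm_num)]; omega
      obtain ⟨hl, hr⟩ := ih n f (i + PySem.Int.floordiv (n - i) 2) (by omega) hle hf
      exact ⟨by omega, hr⟩
    · simp only [halveIdx, if_neg hif]; exact ⟨le_refl _, hin⟩

-- shift invariance of the halving loop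
theorem pvHalveShift (fu : Nat) : ∀ (n f i s : Int),
    halveIdx fu (n + s) (f + s) (i + s) = s + halveIdx fu n f i := by
  induction fu with
  | zero => intro n f i s; simp [halveIdx]; ring
  | succ fu ih =>
    intro n f i s
    simp only [halveIdx]
    by_cases hif : i < f
    · rw [if_pos (by omega), if_pos hif]
      have e : n + s - (i + s) = n - i := by ring
      rw [e]
      have e2 : i + s + PySem.Int.floordiv (n - i) 2 = (i + PySem.Int.floordiv (n - i) 2) + s := by ring
      rw [e2, ih]
    · rw [if_neg (by omega), if_neg hif]
      ring

-- sorted case: decimate_alt returns d unchanged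
theorem pvAltSorted (d : List Int) (h : d.Pairwise (· ≤ ·)) : decimate_alt d = d := by
  unfold decimate_alt
  have h0 : lastDescent d ≤ ((0 : Nat) : Int) := (pvChar d 0).2 (by simpa using h)
  have hb := pvLastDescentBounds d
  have hf : lastDescent d = 0 := by omega
  rw [hf, pvHalveStop _ _ _ _ (by omega)]
  rw [show (0 : Int) = ((0 : Nat) : Int) from rfl, PySem.List.slice_from_natCast]
  rfl

-- unsorted case: decimate_alt recurses through the same half-drop as A
theorem pvAltStep (d : List Int) (h : ¬ d.Pairwise (· ≤ ·)) :
    decimate_alt d = decimate_alt (d.drop (d.length / 2)) := by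
  have hn2 : 2 ≤ d.length := by
    by_contra hc
    exact h (pvShortPairwise d (by omega))
  set n := d.length with hn
  set half := n / 2 with hhalf
  have hhalf1 : 1 ≤ half := by omega
  have hhalfn : half < n := by omega
  set d' := d.drop half with hd'
  have hn' : d'.length = n - half := by rw [hd', List.length_drop]
  set f := lastDescent d with hfdef
  have hb := pvLastDescentBounds d
  have hf1 : 1 ≤ f := by
    rcases lt_or_ge f 1 with hlt | hge
    · exfalso
      exact h (by simpa using (pvChar d 0).1 (by omega))
    · exact hge
  have hfn : f < (n : Int) := by
    have : max 1 (n : Int) = (n : Int) := by omega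
    omega
  set f' := lastDescent d' with hf'def
  have hb' := pvLastDescentBounds d'
  -- f' = max (f - half) 0
  have hf'eq : f' = max (f - (half : Int)) 0 := by
    have hmt : max (f - (half : Int)) 0 = (((f - (half : Int)).toNat : Nat) : Int) := by omega
    apply le_antisymm
    · rw [hmt]
      apply (pvChar d' (f - (half : Int)).toNat).2
      rw [hd', List.drop_drop]
      apply (pvChar d (half + (f - (half : Int)).toNat)).1
      push_cast
      omega
    · have hp' : (d'.drop f'.toNat).Pairwise (· ≤ ·) := by
        apply (pvChar d' f'.toNat).1
        omega
      rw [hd', List.drop_drop] at hp'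
      have := (pvChar d (half + f'.toNat)).2 hp'
      push_cast at this
      omega
  -- compute A-side index: one unfold of the halving loop
  have hfuel : halveIdx n (n : Int) f 0 = halveIdx (f.toNat + 1) (n : Int) f 0 := by
    apply pvHalveFuel n.succ n (f.toNat + 1) (n : Int) f 0 (by omega) <;> omega
  have hstep0 : PySem.Int.floordiv ((n : Int) - 0) 2 = (half : Int) := by
    rw [show (n : Int) - 0 = (n : Int) from by ring]
    rw [hhalf]
    exact_mod_cast PySem.Int.floordiv_natCast n 2
  have hunfold : halveIdx (f.toNat + 1) (n : Int) f 0 = halveIdx f.toNat (n : Int) f (half : Int) := by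
    simp only [halveIdx, if_pos (show (0:Int) < f from by omega), hstep0, zero_add]
  unfold decimate_alt
  rw [← hfdef, ← hf'def, ← hn, hn', hfuel, hunfold]
  rcases le_or_gt f (half : Int) with hcase | hcase
  · -- the loop stops at half; d' is already sorted, so the B-side index is 0
    rw [pvHalveStop _ _ _ _ (by omega)]
    have hf'0 : f' = 0 := by omega
    rw [hf'0, pvHalveStop _ _ _ _ (by omega)]
    rw [show ((half : Nat) : Int) = ((half : Nat) : Int) from rfl, PySem.List.slice_from_natCast]
    rw [show (0 : Int) = ((0 : Nat) : Int) from rfl, PySem.List.slice_from_natCast]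
    simp [hd']
  · -- shift the remaining loop by half; it coincides with the loop on d'
    have hf'v : f' = f - (half : Int) := by omega
    have e1 : (n : Int) = ((n - half : Nat) : Int) + (half : Int) := by omega
    have e2 : f = f' + (half : Int) := by omega
    have hsh : halveIdx f.toNat (n : Int) f ((half : Nat) : Int) =
        ((half : Nat) : Int) + halveIdx f.toNat ((n - half : Nat) : Int) f' 0 := by
      have hs := pvHalveShift f.toNat ((n - half : Nat) : Int) f' 0 ((half : Nat) : Int)
      rw [zero_add] at hs
      rw [← e1, ← e2] at hs
      exact hs
    rw [hsh]
    have hfuel2 : halveIdx f.toNat ((n - half : Nat) : Int) f' 0 =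
        halveIdx (n - half) ((n - half : Nat) : Int) f' 0 := by
      apply pvHalveFuel f.toNat f.toNat (n - half) ((n - half : Nat) : Int) f' 0  (by omega) <;> omega
    rw [hfuel2]
    set J := halveIdx (n - half) ((n - half : Nat) : Int) f' 0 with hJ
    have hJb := pvHalveBounds (n - half) ((n - half : Nat) : Int) f' 0 (le_refl 0) (by positivity) (by omega)
    have eJ : (half : Int) + J = ((half + J.toNat : Nat) : Int) := by push_cast; omega
    have eJ2 : J = ((J.toNat : Nat) : Int) := by omega
    rw [eJ, PySem.List.slice_from_natCast, eJ2, PySem.List.slice_from_natCast]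
    rw [hd', List.drop_drop, Int.toNat_natCast]

-- main equivalence, by strong recursion on the length (mirroring A's loop)
theorem pvMain (d : List Int) : decimate d = decimate_alt d := by
  by_cases h : d.Pairwise (· ≤ ·)
  · rw [decimate, if_neg (by simpa using (pvSortedIff d).2 h), pvAltSorted d h]
  · have hs : PySem.List.sorted d (fun x => x) false ≠ d := fun hc => h ((pvSortedIff d).1 hc)
    have hn2 : 2 ≤ d.length := by
      by_contra hc
      exact h (pvShortPairwise d (by omega))
    rw [decimate, if_pos hs, PySem.List.slice_from_natCast]
    rw [pvMain (d.drop (d.length / 2))]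
    exact (pvAltStep d h).symm
termination_by d.length
decreasing_by
  rw [List.length_drop]; omega

-- ===== VERDICT (by name: the statement is the Claim_ definition above) =====
theorem decimate_spec : Claim_equal_decimate := by
  intro d _
  unfold Spec_decimate
  exact pvMain d
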